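-- pv_equiv track=rewrite | github.com/ZeroxAlone/190603 | homework3.py | how_many
-- ===== SOURCE A (Python) =====
-- def how_many(aDict):
--     a=[]
--     p=0
--     for i in aDict:
--         a.append(aDict[i])
--     for j in a:
--         for l in j:
--             p+=1
--     return p
-- ===== SOURCE B (Python) =====
-- def how_many(aDict):
--     return sum(len(v) for v in aDict.values())
-- ===== Notes on version B (the rewrite author's own statement) =====
-- stated objective: simpler
-- what changed: B sums len(v) over the dict's values in one pass, never visiting individual elements, instead of A's building a list of values and counting every element with two nested loops.
import Mathlib
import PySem

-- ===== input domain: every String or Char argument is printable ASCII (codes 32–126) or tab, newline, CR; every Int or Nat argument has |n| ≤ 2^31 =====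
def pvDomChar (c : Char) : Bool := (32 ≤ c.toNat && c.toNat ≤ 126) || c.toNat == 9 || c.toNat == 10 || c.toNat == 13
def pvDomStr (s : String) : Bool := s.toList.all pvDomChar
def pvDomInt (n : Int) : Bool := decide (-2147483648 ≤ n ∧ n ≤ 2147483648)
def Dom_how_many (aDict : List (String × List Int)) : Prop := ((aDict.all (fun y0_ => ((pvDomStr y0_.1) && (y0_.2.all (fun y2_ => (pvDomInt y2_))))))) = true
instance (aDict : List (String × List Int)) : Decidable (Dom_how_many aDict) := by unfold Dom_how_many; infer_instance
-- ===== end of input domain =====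

-- B replaces A's element-by-element nested counting loops with a single pass summing len(v) over the values.
-- ===== PORT A =====
def how_many (aDict : List (String × List Int)) : Int :=
  let a : List (List Int) :=
    aDict.foldl (fun acc kv => acc ++ [(PySem.Dict.mk aDict).getD kv.1 []]) []
  a.foldl (fun p j => j.foldl (fun p _ => p + 1) p) 0

-- ===== PORT B =====
def how_many_alt (aDict : List (String × List Int)) : Int :=
  (aDict.map (fun kv => (kv.2.length : Int))).sum

-- ===== PRECONDITION & SPEC =====
-- Pre_ excludes association lists with duplicate keys: those do not arise from a Python dict,
-- so A's key-iteration-plus-first-match-lookup value there is an artefact of the encoding.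
def Pre_how_many (aDict : List (String × List Int)) : Prop := (aDict.map Prod.fst).Nodup
instance (aDict : List (String × List Int)) : Decidable (Pre_how_many aDict) := by unfold Pre_how_many; infer_instance
def pvWitness_how_many : (List (String × List Int)) := [("a", [1, 2]), ("b", [])]
def Spec_how_many (aDict : List (String × List Int)) (out : Int) : Prop := out = how_many_alt aDict
instance (aDict : List (String × List Int)) (out : Int) : Decidable (Spec_how_many aDict out) := by unfold Spec_how_many; infer_instance

-- ===== CLAIM (what is proved, stated in full; the proofs are below) =====
def Claim_equal_how_many : Prop := ∀ (aDict : List (String × List Int)), Dom_how_many aDict → Pre_how_many aDict → Spec_how_many aDict (how_many aDict)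

-- ===== LEMMAS AND PROOFS =====
theorem count_foldl_eq (j : List Int) (p : Int) :
    j.foldl (fun p _ => p + 1) p = p + j.length := by
  induction j generalizing p with
  | nil => simp
  | cons x xs ih => simp [List.foldl, ih]; omega

theorem outer_foldl_eq (a : List (List Int)) (p : Int) :
    a.foldl (fun p j => j.foldl (fun p _ => p + 1) p) p
      = p + (a.map (fun j => (j.length : Int))).sum := by
  induction a generalizing p with
  | nil => simp
  | cons x xs ih => rw [List.foldl_cons, count_foldl_eq, ih]; simp; ring

theorem build_a_eq (aDict : List (String × List Int))
    (h : (aDict.map Prod.fst).Nodup) :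
    aDict.foldl (fun acc kv => acc ++ [(PySem.Dict.mk aDict).getD kv.1 []]) []
      = aDict.map Prod.snd := by
  rw [PySem.List.foldl_append_singleton_eq_map, List.nil_append]
  apply List.map_congr_left
  intro kv hm
  exact PySem.Dict.getD_of_mem_items (d := PySem.Dict.mk aDict) hm h []

-- ===== VERDICT (by name: the statement is the Claim_ definition above) =====
theorem how_many_spec : Claim_equal_how_many := by
  intro aDict _ hpre
  unfold Spec_how_many how_many how_many_alt
  rw [build_a_eq aDict hpre, outer_foldl_eq]
  simp [List.map_map, Function.comp_def]
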